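-- pv_equiv track=rewrite | github.com/jameshyojaelee/TIGER_OT | tests/unit/test_offtarget_binary.py | _brute_counts
-- ===== SOURCE A (Python) =====
-- def _brute_counts(sequence: str, transcripts) -> list[int]:
--     max_mismatch = 5
--     counts = [0] * (max_mismatch + 1)
--     length = len(sequence)
--     for ref in transcripts:
--         for pos in range(0, len(ref) - length + 1):
--             window = ref[pos : pos + length]
--             mismatches = sum(1 for a, b in zip(sequence, window) if a != b)
--             if mismatches <= max_mismatch:
--                 counts[mismatches] += 1
--     return counts
-- ===== SOURCE B (Python) =====
-- def _brute_counts(sequence: str, transcripts) -> list[int]: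
--     # Transposed traversal: instead of scanning each window, keep one running
--     # mismatch-count array over all windows of a transcript and update it with
--     # a single zip pass per character of `sequence`; bucket the totals at the end.
--     counts = [0] * 6
--     for ref in transcripts:
--         width = len(ref) - len(sequence) + 1
--         mis = [0] * width  # empty when width <= 0
--         for d, ch in enumerate(sequence):
--             mis = [m + (ch != c) for m, c in zip(mis, ref[d:d + width])]
--         for m in mis:
--             if m <= 5:
--                 counts[m] += 1
--     return counts
-- ===== Notes on version B (the rewrite author's own statement) =====
-- stated objective: alternative
-- what changed: Instead of extracting each window and summing its mismatches, B maintains one mismatch-count array over all windows of a transcript, updating it with a single zip pass per character of the query, and buckets the per-window totals at the end.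
import Mathlib
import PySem

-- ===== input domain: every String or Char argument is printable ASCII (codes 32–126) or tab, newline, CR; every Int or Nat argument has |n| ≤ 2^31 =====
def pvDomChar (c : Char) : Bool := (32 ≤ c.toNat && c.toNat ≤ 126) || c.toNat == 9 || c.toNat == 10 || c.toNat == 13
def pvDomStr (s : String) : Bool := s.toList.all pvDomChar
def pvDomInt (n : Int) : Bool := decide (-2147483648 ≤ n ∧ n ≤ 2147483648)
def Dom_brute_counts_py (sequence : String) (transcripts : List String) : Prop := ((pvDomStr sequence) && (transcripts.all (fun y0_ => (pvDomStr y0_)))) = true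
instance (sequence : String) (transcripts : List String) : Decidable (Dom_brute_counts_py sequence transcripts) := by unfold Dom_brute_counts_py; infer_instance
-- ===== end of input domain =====

-- B replaces A's per-window scan by one running mismatch-count array per transcript,
-- updated with a zip pass per query character and bucketed at the end (objective: alternative).

-- ===== PORT A =====
def brute_counts_py (sequence : String) (transcripts : List String) : List Int :=
  let seq := sequence.toList
  let length : Int := (seq.length : Int)
  transcripts.foldl
    (fun counts ref =>
      (PySem.List.pyRange 0 ((ref.toList.length : Int) - length + 1) 1).foldl
        (fun counts pos =>
          let window := PySem.List.slice ref.toList (some pos) (some (pos + length))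
          let mismatches : Int :=
            (seq.zip window).foldl (fun acc p => if p.1 ≠ p.2 then acc + 1 else acc) 0
          if mismatches ≤ 5 then
            PySem.List.pySetD counts mismatches (PySem.List.pyGetD counts mismatches 0 + 1)
          else counts)
        counts)
    (List.replicate 6 0)

-- ===== PORT B =====
-- one step of B's inner loop: bump every window's running mismatch count against this row
def pvRow (ch : Char) (mis : List Int) (row : List Char) : List Int :=
  (mis.zip row).map (fun p => p.1 + if ch ≠ p.2 then (1 : Int) else 0)

-- B's final bucketing step: counts[m] += 1 when m <= 5
def pvBucket (counts : List Int) (m : Int) : List Int :=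
  if m ≤ 5 then PySem.List.pySetD counts m (PySem.List.pyGetD counts m 0 + 1) else counts

def brute_counts_py_alt (sequence : String) (transcripts : List String) : List Int :=
  let seq := sequence.toList
  transcripts.foldl
    (fun counts ref =>
      let width : Int := (ref.toList.length : Int) - (seq.length : Int) + 1
      let mis := (PySem.List.enumerate seq).foldl
        (fun mis dch =>
          pvRow dch.2 mis (PySem.List.slice ref.toList (some dch.1) (some (dch.1 + width))))
        (List.replicate width.toNat 0)
      mis.foldl pvBucket counts)
    (List.replicate 6 0)

-- ===== PRECONDITION & SPEC =====
def Spec_brute_counts_py (sequence : String) (transcripts : List String) (out : List Int) : Prop := out = brute_counts_py_alt sequence transcripts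
instance (sequence : String) (transcripts : List String) (out : List Int) : Decidable (Spec_brute_counts_py sequence transcripts out) := by unfold Spec_brute_counts_py; infer_instance

-- ===== CLAIM (what is proved, stated in full; the proofs are below) =====
def Claim_equal_brute_counts_py : Prop := ∀ (sequence : String) (transcripts : List String), Dom_brute_counts_py sequence transcripts → Spec_brute_counts_py sequence transcripts (brute_counts_py sequence transcripts)

-- ===== LEMMAS AND PROOFS =====

-- mismatch count between s and t (zip truncates), as both programs produce it
def pvZ (s t : List Char) : Int := ((s.zip t).countP (fun p => p.1 != p.2) : Nat)

lemma pvZ_nil (t : List Char) : pvZ [] t = 0 := rfl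

lemma countA (s w : List Char) :
    (s.zip w).foldl (fun acc p => if p.1 ≠ p.2 then acc + 1 else acc) (0 : Int) = pvZ s w := by
  have h := PySem.List.foldl_count_if (fun p : Char × Char => p.1 != p.2) (s.zip w) 0
  simpa [pvZ, bne_iff_ne] using h

lemma zip_take_len {α β : Type} (s : List α) : ∀ t : List β, s.zip (t.take s.length) = s.zip t := by
  induction s with
  | nil => intro t; simp
  | cons a s ih =>
    intro t
    cases t with
    | nil => simp
    | cons b t => simp [List.zip_cons_cons, ih t]

lemma pvZ_take (s t : List Char) : pvZ s (t.take s.length) = pvZ s t := by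
  unfold pvZ; rw [zip_take_len]

lemma pvZ_cons (ch : Char) (s t : List Char) (pos : Nat) (h : pos < t.length) :
    pvZ (ch :: s) (t.drop pos)
      = (if ch ≠ t.getD pos ' ' then (1 : Int) else 0) + pvZ s (t.drop (pos + 1)) := by
  rw [List.drop_eq_getElem_cons h]
  unfold pvZ
  rw [List.zip_cons_cons, List.countP_cons, List.getD_eq_getElem t ' ' h]
  by_cases hch : ch = t[pos] <;> simp [hch, add_comm]

lemma rowfold_nil (l : List (Int × Char)) (g : Int × Char → List Char) :
    l.foldl (fun mis dch => pvRow dch.2 mis (g dch)) ([] : List Int) = [] := by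
  induction l with
  | nil => rfl
  | cons dch l ih => simpa [pvRow] using ih

lemma rowfold (Wn : Nat) (r : List Char) (s : List Char) : ∀ (dn : Nat) (mis : List Int),
    mis.length = Wn → Wn + s.length + dn ≤ r.length + 1 →
    (PySem.List.enumerate s (dn : Int)).foldl
        (fun mis dch =>
          pvRow dch.2 mis (PySem.List.slice r (some dch.1) (some (dch.1 + (Wn : Int)))))
        mis
      = (List.range Wn).map (fun pos => mis.getD pos 0 + pvZ s (r.drop (pos + dn))) := by
  induction s with
  | nil =>
    intro dn mis hm _
    subst hm
    refine List.ext_getElem (by simp) ?_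
    intro i h1 h2
    have hi : i < mis.length := by simpa using h1
    simp [pvZ_nil, List.getElem?_eq_getElem hi, PySem.List.enumerate]
  | cons ch s ih =>
    intro dn mis hm hb
    simp only [List.length_cons] at hb
    have hdr : dn + Wn ≤ r.length := by omega
    rw [PySem.List.enumerate_cons, List.foldl_cons]
    have hcast : (dn : Int) + (Wn : Int) = ((dn + Wn : Nat) : Int) := by push_cast; ring
    have hrow : pvRow ch mis (PySem.List.slice r (some (dn : Int)) (some ((dn : Int) + (Wn : Int))))
        = (mis.zip (r.drop dn)).map (fun p => p.1 + if ch ≠ p.2 then (1 : Int) else 0) := by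
      rw [hcast, show ((dn + Wn : Nat) : Int) = ((dn : Nat) : Int) + ((Wn : Nat) : Int) by push_cast; ring]
      rw [PySem.List.slice_natCast_add]
      unfold pvRow
      rw [show Wn = mis.length from hm.symm, zip_take_len]
    rw [hrow]
    have hdroplen : Wn ≤ (r.drop dn).length := by simp [List.length_drop]; omega
    have hm' : ((mis.zip (r.drop dn)).map (fun p => p.1 + if ch ≠ p.2 then (1 : Int) else 0)).length
        = Wn := by simp [List.length_zip]; omega
    have hcast1 : (dn : Int) + 1 = ((dn + 1 : Nat) : Int) := by push_cast; ring
    rw [hcast1, ih (dn + 1) _ hm' (by omega)]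
    apply List.map_congr_left
    intro pos hpos
    rw [List.mem_range] at hpos
    have hposr : pos + dn < r.length := by omega
    have hzl : pos < (mis.zip (r.drop dn)).length := by
      rw [List.length_zip]; rw [hm]; omega
    have hgd : ((mis.zip (r.drop dn)).map (fun p => p.1 + if ch ≠ p.2 then (1 : Int) else 0)).getD pos 0
        = mis.getD pos 0 + (if ch ≠ r.getD (pos + dn) ' ' then (1 : Int) else 0) := by
      rw [List.getD_eq_getElem _ _ (by rw [hm']; exact hpos)]
      have hpm : pos < mis.length := by omega
      simp [List.getElem_zip, List.getElem?_eq_getElem hpm, List.getElem_drop,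
        List.getElem?_eq_getElem hposr, Nat.add_comm dn pos]
    rw [hgd, pvZ_cons ch s r (pos + dn) hposr]
    rw [show pos + (dn + 1) = pos + dn + 1 by ring]
    ring

lemma perRef (seq : List Char) (counts : List Int) (r : List Char) :
    (PySem.List.pyRange 0 ((r.length : Int) - (seq.length : Int) + 1) 1).foldl
        (fun counts pos =>
          let window := PySem.List.slice r (some pos) (some (pos + (seq.length : Int)))
          let mismatches : Int :=
            (seq.zip window).foldl (fun acc p => if p.1 ≠ p.2 then acc + 1 else acc) 0
          if mismatches ≤ 5 then
            PySem.List.pySetD counts mismatches (PySem.List.pyGetD counts mismatches 0 + 1)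
          else counts)
        counts
      = ((PySem.List.enumerate seq).foldl
          (fun mis dch =>
            pvRow dch.2 mis (PySem.List.slice r (some dch.1)
              (some (dch.1 + ((r.length : Int) - (seq.length : Int) + 1)))))
          (List.replicate ((r.length : Int) - (seq.length : Int) + 1).toNat 0)).foldl
          pvBucket counts := by
  have hA :
      (PySem.List.pyRange 0 ((r.length : Int) - (seq.length : Int) + 1) 1).foldl
        (fun counts pos =>
          let window := PySem.List.slice r (some pos) (some (pos + (seq.length : Int)))
          let mismatches : Int :=
            (seq.zip window).foldl (fun acc p => if p.1 ≠ p.2 then acc + 1 else acc) 0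
          if mismatches ≤ 5 then
            PySem.List.pySetD counts mismatches (PySem.List.pyGetD counts mismatches 0 + 1)
          else counts)
        counts
      = (List.range ((r.length : Int) - (seq.length : Int) + 1).toNat).foldl
          (fun c k => pvBucket c (pvZ seq (r.drop k))) counts := by
    rw [PySem.List.pyRange_one, List.foldl_map]
    simp only [sub_zero, zero_add]
    have hstep : ∀ (c : List Int) (k : Nat),
        (fun (counts : List Int) (pos : Int) =>
          let window := PySem.List.slice r (some pos) (some (pos + (seq.length : Int)))
          let mismatches : Int :=
            (seq.zip window).foldl (fun acc p => if p.1 ≠ p.2 then acc + 1 else acc) 0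
          if mismatches ≤ 5 then
            PySem.List.pySetD counts mismatches (PySem.List.pyGetD counts mismatches 0 + 1)
          else counts) c (k : Int)
        = pvBucket c (pvZ seq (r.drop k)) := by
      intro c k
      simp only [PySem.List.slice_natCast_add, countA, pvZ_take]
      rfl
    have : (fun (c : List Int) (k : Nat) =>
        (fun (counts : List Int) (pos : Int) =>
          let window := PySem.List.slice r (some pos) (some (pos + (seq.length : Int)))
          let mismatches : Int :=
            (seq.zip window).foldl (fun acc p => if p.1 ≠ p.2 then acc + 1 else acc) 0
          if mismatches ≤ 5 then
            PySem.List.pySetD counts mismatches (PySem.List.pyGetD counts mismatches 0 + 1)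
          else counts) c (k : Int))
        = fun c k => pvBucket c (pvZ seq (r.drop k)) :=
      funext fun c => funext fun k => hstep c k
    rw [this]
  rw [hA]
  by_cases hc : seq.length ≤ r.length + 1
  · have hWint : ((r.length : Int) - (seq.length : Int) + 1)
        = ((((r.length : Int) - (seq.length : Int) + 1).toNat : Nat) : Int) := by omega
    have hr := rowfold (((r.length : Int) - (seq.length : Int) + 1).toNat) r seq 0
        (List.replicate (((r.length : Int) - (seq.length : Int) + 1).toNat) 0)
        (by simp) (by omega)
    rw [Nat.cast_zero, ← hWint] at hr
    rw [hr]
    have hmap : (List.range ((r.length : Int) - (seq.length : Int) + 1).toNat).map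
          (fun pos =>
            (List.replicate (((r.length : Int) - (seq.length : Int) + 1).toNat) (0 : Int)).getD pos 0
              + pvZ seq (r.drop (pos + 0)))
        = (List.range ((r.length : Int) - (seq.length : Int) + 1).toNat).map
          (fun pos => pvZ seq (r.drop pos)) := by
      apply List.map_congr_left
      intro pos hpos
      rw [List.mem_range] at hpos
      rw [List.getD_replicate _ hpos, Nat.add_zero, zero_add]
    rw [hmap, List.foldl_map]
  · have hW : ((r.length : Int) - (seq.length : Int) + 1).toNat = 0 := by omega
    simp only [hW, List.replicate_zero, List.range_zero, List.foldl_nil]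
    rw [rowfold_nil]
    rfl

-- ===== VERDICT (by name: the statement is the Claim_ definition above) =====
theorem brute_counts_py_spec : Claim_equal_brute_counts_py := by
  intro sequence transcripts _
  show brute_counts_py sequence transcripts = brute_counts_py_alt sequence transcripts
  simp only [brute_counts_py, brute_counts_py_alt]
  congr 1
  funext counts ref
  exact perRef sequence.toList counts ref.toList
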